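-- pv_equiv track=rewrite | github.com/chingsley/6314_ml_project_sample_collection | EnergySmells_Verified/OverUseOfLoops/augmented/count_vowel_triples/smelly_count_vowel_triples.py | count_vowel_triples
-- ===== SOURCE A (Python) =====
-- def count_vowel_triples(s):
--     # Counts triples of vowels (e.g., "aei") in order
--     vowels = "aeiou"
--     count = 0
--     for i in range(len(s)):
--         for j in range(i + 1, len(s)):
--             for k in range(j + 1, len(s)):
--                 if s[i] in vowels and s[j] in vowels and s[k] in vowels:
--                     count += 1
--     return count
-- ===== SOURCE B (Python) =====
-- def count_vowel_triples(s):
--     # Closed form: the triples counted by the cubic scan are exactly the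
--     # 3-element subsets of the vowel positions, so count vowels once and
--     # return C(v, 3).
--     v = sum(ch in "aeiou" for ch in s)
--     return v * (v - 1) * (v - 2) // 6
-- ===== Notes on version B (the rewrite author's own statement) =====
-- stated objective: faster
-- what changed: Replaced the triple nested index scan with a single pass that counts vowels v and returns the closed form v*(v-1)*(v-2)//6 (= C(v,3)).
import Mathlib
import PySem

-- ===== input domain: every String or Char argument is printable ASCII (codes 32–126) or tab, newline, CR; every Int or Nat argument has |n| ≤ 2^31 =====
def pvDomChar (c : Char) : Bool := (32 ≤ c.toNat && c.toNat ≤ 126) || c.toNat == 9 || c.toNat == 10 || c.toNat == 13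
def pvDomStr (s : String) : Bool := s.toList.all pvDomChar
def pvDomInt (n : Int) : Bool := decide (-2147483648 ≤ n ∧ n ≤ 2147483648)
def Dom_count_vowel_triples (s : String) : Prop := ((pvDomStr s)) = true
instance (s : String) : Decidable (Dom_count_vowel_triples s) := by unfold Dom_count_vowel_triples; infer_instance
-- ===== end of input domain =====

-- B replaces A's cubic triple index scan by one vowel count v and the closed form v*(v-1)*(v-2)//6.

-- ===== PORT A =====
-- Python "c in 'aeiou'" for the one-character string s[i] (used by both ports)
def pvIsVowel (c : Char) : Bool := PySem.Chars.isIn [c] "aeiou".toList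

def count_vowel_triples (s : String) : Int :=
  let cs := s.toList
  let n : Int := PySem.List.len cs
  (PySem.List.pyRange 0 n 1).foldl (fun count i =>
    (PySem.List.pyRange (i + 1) n 1).foldl (fun count j =>
      (PySem.List.pyRange (j + 1) n 1).foldl (fun count k =>
        if pvIsVowel (PySem.List.pyGetD cs i ' ') && pvIsVowel (PySem.List.pyGetD cs j ' ')
             && pvIsVowel (PySem.List.pyGetD cs k ' ')
        then count + 1 else count) count) count) 0

-- ===== PORT B =====
def count_vowel_triples_alt (s : String) : Int :=
  let v : Int := (s.toList.map (fun ch => if pvIsVowel ch then (1 : Int) else 0)).sum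
  PySem.Int.floordiv (v * (v - 1) * (v - 2)) 6

-- ===== PRECONDITION & SPEC =====
def Spec_count_vowel_triples (s : String) (out : Int) : Prop := out = count_vowel_triples_alt s
instance (s : String) (out : Int) : Decidable (Spec_count_vowel_triples s out) := by unfold Spec_count_vowel_triples; infer_instance

-- ===== CLAIM (what is proved, stated in full; the proofs are below) =====
def Claim_equal_count_vowel_triples : Prop := ∀ (s : String), Dom_count_vowel_triples s → Spec_count_vowel_triples s (count_vowel_triples s)

-- ===== LEMMAS AND PROOFS =====

-- vowel count, vowel-pair count and vowel-triple count of a list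
def pvCnt1 (l : List Char) : Int := (l.map (fun ch => if pvIsVowel ch then (1 : Int) else 0)).sum
def pvCnt2 : List Char → Int
  | [] => 0
  | c :: t => (if pvIsVowel c then pvCnt1 t else 0) + pvCnt2 t
def pvCnt3 : List Char → Int
  | [] => 0
  | c :: t => (if pvIsVowel c then pvCnt2 t else 0) + pvCnt3 t

lemma pv_cnt1_countP (l : List Char) : pvCnt1 l = (l.countP pvIsVowel : Int) := by
  simp [pvCnt1, PySem.List.sum_map_ite_one_zero]

lemma pv_cnt1_cons (c : Char) (t : List Char) :
    pvCnt1 (c :: t) = (if pvIsVowel c then 1 else 0) + pvCnt1 t := by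
  simp [pvCnt1]

-- innermost loop of A
lemma pv_inner (cs : List Char) (b : Bool) (a : Int) (ha : 0 ≤ a) (acc : Int) :
    (PySem.List.pyRange a (PySem.List.len cs) 1).foldl
      (fun c k => if b && pvIsVowel (PySem.List.pyGetD cs k ' ') then c + 1 else c) acc
    = acc + (if b then pvCnt1 (cs.drop a.toNat) else 0) := by
  rw [PySem.List.foldl_pyRange_pyGetD cs ' '
      (fun c ch => if b && pvIsVowel ch then c + 1 else c) acc ha,
    PySem.List.foldl_if_add_one]
  cases b <;> simp [pv_cnt1_countP]

-- the middle loop's body, summed over the tail of the index range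
lemma pv_sum2 (cs : List Char) (b : Bool) : ∀ (m a : Nat), cs.length - a = m →
    ((PySem.List.pyRange (a : Int) (PySem.List.len cs) 1).map
      (fun j => if b && pvIsVowel (PySem.List.pyGetD cs j ' ')
                then pvCnt1 (cs.drop (j + 1).toNat) else 0)).sum
    = (if b then pvCnt2 (cs.drop a) else 0) := by
  intro m
  induction m with
  | zero =>
    intro a hm
    have hlen : cs.length ≤ a := by omega
    rw [PySem.List.pyRange_one_eq_nil (by simp; exact_mod_cast hlen)]
    rw [List.drop_of_length_le hlen]
    simp [pvCnt2]
  | succ m ih =>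
    intro a hm
    have hlt : a < cs.length := by omega
    rw [PySem.List.pyRange_one_cons (by simp; exact_mod_cast hlt)]
    rw [List.map_cons, List.sum_cons]
    have hcast : ((a : Int) + 1) = ((a + 1 : Nat) : Int) := by push_cast; ring
    rw [hcast, ih (a + 1) (by omega)]
    have htn : (((a + 1 : Nat) : Int)).toNat = a + 1 := by omega
    rw [htn]
    have hget : PySem.List.pyGetD cs ((a : Int)) ' ' = cs[a] := by
      rw [PySem.List.pyGetD_natCast]; exact List.getD_eq_getElem cs ' ' hlt
    rw [hget, List.drop_eq_getElem_cons hlt, pvCnt2]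
    cases b <;> simp

lemma pv_sum2' (cs : List Char) (b : Bool) (a : Int) (ha : 0 ≤ a) :
    ((PySem.List.pyRange a (PySem.List.len cs) 1).map
      (fun j => if b && pvIsVowel (PySem.List.pyGetD cs j ' ')
                then pvCnt1 (cs.drop (j + 1).toNat) else 0)).sum
    = (if b then pvCnt2 (cs.drop a.toNat) else 0) := by
  have h := pv_sum2 cs b (cs.length - a.toNat) a.toNat rfl
  rwa [Int.toNat_of_nonneg ha] at h

-- the outer loop's body, summed over the tail of the index range
lemma pv_sum3 (cs : List Char) : ∀ (m a : Nat), cs.length - a = m →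
    ((PySem.List.pyRange (a : Int) (PySem.List.len cs) 1).map
      (fun i => if pvIsVowel (PySem.List.pyGetD cs i ' ')
                then pvCnt2 (cs.drop (i + 1).toNat) else 0)).sum
    = pvCnt3 (cs.drop a) := by
  intro m
  induction m with
  | zero =>
    intro a hm
    have hlen : cs.length ≤ a := by omega
    rw [PySem.List.pyRange_one_eq_nil (by simp; exact_mod_cast hlen)]
    rw [List.drop_of_length_le hlen]
    simp [pvCnt3]
  | succ m ih =>
    intro a hm
    have hlt : a < cs.length := by omega
    rw [PySem.List.pyRange_one_cons (by simp; exact_mod_cast hlt)]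
    rw [List.map_cons, List.sum_cons]
    have hcast : ((a : Int) + 1) = ((a + 1 : Nat) : Int) := by push_cast; ring
    rw [hcast, ih (a + 1) (by omega)]
    have htn : (((a + 1 : Nat) : Int)).toNat = a + 1 := by omega
    rw [htn]
    have hget : PySem.List.pyGetD cs ((a : Int)) ' ' = cs[a] := by
      rw [PySem.List.pyGetD_natCast]; exact List.getD_eq_getElem cs ' ' hlt
    rw [hget, List.drop_eq_getElem_cons hlt, pvCnt3]

lemma pv_sum3' (cs : List Char) (a : Int) (ha : 0 ≤ a) :
    ((PySem.List.pyRange a (PySem.List.len cs) 1).map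
      (fun i => if pvIsVowel (PySem.List.pyGetD cs i ' ')
                then pvCnt2 (cs.drop (i + 1).toNat) else 0)).sum
    = pvCnt3 (cs.drop a.toNat) := by
  have h := pv_sum3 cs (cs.length - a.toNat) a.toNat rfl
  rwa [Int.toNat_of_nonneg ha] at h

-- middle loop of A (for a fixed outer index i)
lemma pv_mid (cs : List Char) (i : Int) (hi : 0 ≤ i) (acc : Int) :
    (PySem.List.pyRange (i + 1) (PySem.List.len cs) 1).foldl (fun count j =>
      (PySem.List.pyRange (j + 1) (PySem.List.len cs) 1).foldl (fun count k =>
        if pvIsVowel (PySem.List.pyGetD cs i ' ') && pvIsVowel (PySem.List.pyGetD cs j ' ')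
             && pvIsVowel (PySem.List.pyGetD cs k ' ')
        then count + 1 else count) count) acc
    = acc + (if pvIsVowel (PySem.List.pyGetD cs i ' ')
             then pvCnt2 (cs.drop (i + 1).toNat) else 0) := by
  rw [PySem.List.foldl_congr_mem (PySem.List.pyRange (i + 1) (PySem.List.len cs) 1) _
      (fun count j =>
        count + (if pvIsVowel (PySem.List.pyGetD cs i ' ') && pvIsVowel (PySem.List.pyGetD cs j ' ')
                 then pvCnt1 (cs.drop (j + 1).toNat) else 0)) acc
      (fun acc' j hj => by
        have hj' := (PySem.List.mem_pyRange_one.mp hj).1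
        exact pv_inner cs _ (j + 1) (by omega) acc')]
  rw [PySem.List.foldl_add, pv_sum2' cs _ (i + 1) (by omega)]

-- A computes the vowel-triple count of the character list
lemma pv_main (s : String) : count_vowel_triples s = pvCnt3 s.toList := by
  show (PySem.List.pyRange 0 (PySem.List.len s.toList) 1).foldl (fun count i =>
      (PySem.List.pyRange (i + 1) (PySem.List.len s.toList) 1).foldl (fun count j =>
        (PySem.List.pyRange (j + 1) (PySem.List.len s.toList) 1).foldl (fun count k =>
          if pvIsVowel (PySem.List.pyGetD s.toList i ' ') && pvIsVowel (PySem.List.pyGetD s.toList j ' ')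
               && pvIsVowel (PySem.List.pyGetD s.toList k ' ')
          then count + 1 else count) count) count) 0 = pvCnt3 s.toList
  rw [PySem.List.foldl_congr_mem (PySem.List.pyRange 0 (PySem.List.len s.toList) 1) _
      (fun count i =>
        count + (if pvIsVowel (PySem.List.pyGetD s.toList i ' ')
                 then pvCnt2 (s.toList.drop (i + 1).toNat) else 0)) 0
      (fun acc i hi => by
        have hi' := (PySem.List.mem_pyRange_one.mp hi).1
        exact pv_mid s.toList i hi' acc)]
  rw [PySem.List.foldl_add, pv_sum3' s.toList 0 (by omega)]
  simp

-- the combinatorial closed forms for the pair and triple counts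
lemma pv_comb (l : List Char) :
    2 * pvCnt2 l = pvCnt1 l * (pvCnt1 l - 1) ∧
    6 * pvCnt3 l = pvCnt1 l * (pvCnt1 l - 1) * (pvCnt1 l - 2) := by
  induction l with
  | nil => simp [pvCnt1, pvCnt2, pvCnt3]
  | cons c t ih =>
    obtain ⟨h2, h3⟩ := ih
    cases hv : pvIsVowel c
    · constructor
      · simp only [pvCnt2, pv_cnt1_cons, hv, Bool.false_eq_true, if_false, zero_add]
        linear_combination h2
      · simp only [pvCnt3, pv_cnt1_cons, hv, Bool.false_eq_true, if_false, zero_add]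
        linear_combination h3
    · constructor
      · simp only [pvCnt2, pv_cnt1_cons, hv, if_true]
        linear_combination h2
      · simp only [pvCnt3, pv_cnt1_cons, hv, if_true]
        linear_combination 3 * h2 + h3

-- ===== VERDICT (by name: the statement is the Claim_ definition above) =====
theorem count_vowel_triples_spec : Claim_equal_count_vowel_triples := by
  intro s _
  unfold Spec_count_vowel_triples count_vowel_triples_alt
  rw [pv_main]
  show pvCnt3 s.toList = PySem.Int.floordiv
    (pvCnt1 s.toList * (pvCnt1 s.toList - 1) * (pvCnt1 s.toList - 2)) 6
  rw [← (pv_comb s.toList).2]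
  rw [PySem.Int.floordiv_eq_ediv_of_pos (by norm_num)]
  exact (Int.mul_ediv_cancel_left _ (by norm_num)).symm
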